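-- pv_equiv track=rewrite | github.com/Venkataramana-Baratam/GFG-SOLUTIONS | Difficulty: Medium/Subarrays with K Distinct Integers/subarrays-with-k-distinct-integers.py | exactlyK
-- ===== SOURCE A (Python) =====
-- from collections import defaultdict
--
-- def exactlyK(arr, k):
--     # Code here
--     def atmost(k):
--         l = 0
--         cnt = 0
--         mpp = defaultdict(int)
--         for r in range(len(arr)):
--             mpp[arr[r]]+=1
--             while len(mpp)>k:
--                 mpp[arr[l]]-=1
--                 if mpp[arr[l]]==0:
--                     del mpp[arr[l]]
--                 l+=1
--             cnt+=(r-l+1)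
--         return cnt
--     return atmost(k)-atmost(k-1)
-- ===== SOURCE B (Python) =====
-- from collections import defaultdict
--
-- def exactlyK(arr, k):
--     # One fused pass: two sliding windows (at-most-k and at-most-(k-1)) advanced together.
--     l1 = 0
--     l2 = 0
--     m1 = defaultdict(int)
--     m2 = defaultdict(int)
--     ans = 0
--     for r in range(len(arr)):
--         m1[arr[r]] += 1
--         while len(m1) > k:
--             m1[arr[l1]] -= 1
--             if m1[arr[l1]] == 0:
--                 del m1[arr[l1]]
--             l1 += 1
--         m2[arr[r]] += 1
--         while len(m2) > k - 1:
--             m2[arr[l2]] -= 1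
--             if m2[arr[l2]] == 0:
--                 del m2[arr[l2]]
--             l2 += 1
--         ans += l2 - l1
--     return ans
-- ===== Notes on version B (the rewrite author's own statement) =====
-- stated objective: alternative
-- what changed: Replaces the two independent atmost(k) and atmost(k-1) passes and their subtraction by a single fused left-to-right pass that maintains both sliding windows (two left pointers, two count maps) simultaneously and accumulates l2-l1 per step.
import Mathlib
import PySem

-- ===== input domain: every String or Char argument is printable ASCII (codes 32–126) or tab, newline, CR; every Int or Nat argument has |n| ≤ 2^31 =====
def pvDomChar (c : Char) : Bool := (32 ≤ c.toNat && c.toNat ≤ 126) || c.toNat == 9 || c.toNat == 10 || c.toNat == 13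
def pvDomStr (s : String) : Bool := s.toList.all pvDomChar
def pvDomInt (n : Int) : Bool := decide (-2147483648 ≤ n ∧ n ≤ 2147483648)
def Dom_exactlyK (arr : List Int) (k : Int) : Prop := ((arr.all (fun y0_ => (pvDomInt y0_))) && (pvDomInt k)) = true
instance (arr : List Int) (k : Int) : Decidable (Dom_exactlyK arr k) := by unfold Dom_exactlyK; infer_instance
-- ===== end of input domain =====

-- B fuses A's two atmost passes into one pass; same O(n), alternative decomposition.

-- ===== PORT A =====
-- the inner `while len(mpp) > bound:` loop of atmost (shared verbatim by B's windows):
-- `mpp[arr[l]] -= 1; if mpp[arr[l]] == 0: del mpp[arr[l]]; l += 1`.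
-- Fuel-bounded; pyGet? none = Python's IndexError; fuel arr.length+1 is enough since l
-- only grows and pyGet? fails once l ≥ arr.length (fuel 0 is unreachable from l ≥ 0).
def pvShrink (arr : List Int) (bound : Int) : Nat → Int → PySem.Dict Int Int → Option (Int × PySem.Dict Int Int)
  | 0, _, _ => none
  | fuel + 1, l, mpp =>
    if (mpp.size : Int) > bound then
      match PySem.List.pyGet? arr l with
      | none => none
      | some y =>
        let v := mpp.getD y 0 - 1            -- defaultdict(int): missing key reads 0
        let mpp' := if v = 0 then (mpp.insert y v).erase y else mpp.insert y v
        pvShrink arr bound fuel (l + 1) mpp'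
    else
      some (l, mpp)

-- one iteration of atmost's `for r in range(len(arr))` body; state (l, cnt, mpp), none = raised
def pvAtmostStep (arr : List Int) (bound : Int)
    (st : Option (Int × Int × PySem.Dict Int Int)) (r : Nat) :
    Option (Int × Int × PySem.Dict Int Int) :=
  match st with
  | none => none
  | some (l, cnt, mpp) =>
    match PySem.List.pyGet? arr (r : Int) with
    | none => none
    | some x =>
      match pvShrink arr bound (arr.length + 1) l (mpp.insert x (mpp.getD x 0 + 1)) with
      | none => none
      | some (l', mpp') => some (l', cnt + ((r : Int) - l' + 1), mpp')

def pvAtmost (arr : List Int) (bound : Int) : Option Int :=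
  ((List.range arr.length).foldl (pvAtmostStep arr bound)
      (some (0, 0, PySem.Dict.empty))).map (fun s => s.2.1)

def exactlyK (arr : List Int) (k : Int) : Int :=
  match pvAtmost arr k, pvAtmost arr (k - 1) with
  | some a, some b => a - b
  | _, _ => 0                                 -- Python raised (excluded by Pre_)

-- ===== PORT B =====
-- one iteration of the fused loop; state (l1, m1, l2, m2, ans), none = raised
def pvFusedStep (arr : List Int) (k : Int)
    (st : Option (Int × PySem.Dict Int Int × Int × PySem.Dict Int Int × Int)) (r : Nat) :
    Option (Int × PySem.Dict Int Int × Int × PySem.Dict Int Int × Int) :=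
  match st with
  | none => none
  | some (l1, m1, l2, m2, ans) =>
    match PySem.List.pyGet? arr (r : Int) with
    | none => none
    | some x =>
      match pvShrink arr k (arr.length + 1) l1 (m1.insert x (m1.getD x 0 + 1)) with
      | none => none
      | some (l1', m1') =>
        match pvShrink arr (k - 1) (arr.length + 1) l2 (m2.insert x (m2.getD x 0 + 1)) with
        | none => none
        | some (l2', m2') => some (l1', m1', l2', m2', ans + (l2' - l1'))

def exactlyK_alt (arr : List Int) (k : Int) : Int :=
  (((List.range arr.length).foldl (pvFusedStep arr k)
      (some (0, PySem.Dict.empty, 0, PySem.Dict.empty, 0))).map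
    (fun s => s.2.2.2.2)).getD 0

-- ===== PRECONDITION & SPEC =====
-- Pre_ excludes exactly the inputs where A raises IndexError: for k ≤ 0 on a nonempty
-- array, atmost(k-1)'s while-loop walks l past the end of arr.
def Pre_exactlyK (arr : List Int) (k : Int) : Prop := arr = [] ∨ 1 ≤ k
instance (arr : List Int) (k : Int) : Decidable (Pre_exactlyK arr k) := by unfold Pre_exactlyK; infer_instance
def pvWitness_exactlyK : List Int × Int := ([1, 2, 1, 2, 3], 2)

def Spec_exactlyK (arr : List Int) (k : Int) (out : Int) : Prop := out = exactlyK_alt arr k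
instance (arr : List Int) (k : Int) (out : Int) : Decidable (Spec_exactlyK arr k out) := by unfold Spec_exactlyK; infer_instance

-- ===== CLAIM (what is proved, stated in full; the proofs are below) =====
def Claim_equal_exactlyK : Prop := ∀ (arr : List Int) (k : Int), Dom_exactlyK arr k → Pre_exactlyK arr k → Spec_exactlyK arr k (exactlyK arr k)

-- ===== LEMMAS AND PROOFS =====

-- glue a pair of atmost states into a fused state (none if either side raised)
def pvComb (sa sb : Option (Int × Int × PySem.Dict Int Int)) :
    Option (Int × PySem.Dict Int Int × Int × PySem.Dict Int Int × Int) :=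
  sa.bind (fun a => sb.map (fun b => (a.1, a.2.2, b.1, b.2.2, a.2.1 - b.2.1)))

theorem pvFusedStep_comb (arr : List Int) (k : Int) (sa sb : Option (Int × Int × PySem.Dict Int Int)) (r : Nat) :
    pvFusedStep arr k (pvComb sa sb) r = pvComb (pvAtmostStep arr k sa r) (pvAtmostStep arr (k - 1) sb r) := by
  cases sa with
  | none => cases sb with
    | none => rfl
    | some b => rfl
  | some a =>
    obtain ⟨l1, c1, m1⟩ := a
    cases sb with
    | none =>
      cases hg : PySem.List.pyGet? arr (r : Int) with
      | none => simp [pvFusedStep, pvAtmostStep, pvComb, hg]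
      | some x =>
        cases hs : pvShrink arr k (arr.length + 1) l1 (m1.insert x (m1.getD x 0 + 1)) with
        | none => simp [pvFusedStep, pvAtmostStep, pvComb, hg, hs]
        | some p =>
          obtain ⟨l', m'⟩ := p
          simp [pvFusedStep, pvAtmostStep, pvComb, hg, hs]
    | some b =>
      obtain ⟨l2, c2, m2⟩ := b
      cases hg : PySem.List.pyGet? arr (r : Int) with
      | none => simp [pvFusedStep, pvAtmostStep, pvComb, hg]
      | some x =>
        cases hs1 : pvShrink arr k (arr.length + 1) l1 (m1.insert x (m1.getD x 0 + 1)) with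
        | none => simp [pvFusedStep, pvAtmostStep, pvComb, hg, hs1]
        | some p1 =>
          obtain ⟨l1', m1'⟩ := p1
          cases hs2 : pvShrink arr (k - 1) (arr.length + 1) l2 (m2.insert x (m2.getD x 0 + 1)) with
          | none => simp [pvFusedStep, pvAtmostStep, pvComb, hg, hs1, hs2]
          | some p2 =>
            obtain ⟨l2', m2'⟩ := p2
            simp [pvFusedStep, pvAtmostStep, pvComb, hg, hs1, hs2]
            ring

theorem pvFused_foldl_comb (arr : List Int) (k : Int) (rs : List Nat) (sa sb : Option (Int × Int × PySem.Dict Int Int)) :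
    rs.foldl (pvFusedStep arr k) (pvComb sa sb)
      = pvComb (rs.foldl (pvAtmostStep arr k) sa) (rs.foldl (pvAtmostStep arr (k - 1)) sb) := by
  induction rs generalizing sa sb with
  | nil => rfl
  | cons r rs ih =>
    simp only [List.foldl_cons, pvFusedStep_comb]
    exact ih _ _

-- ===== VERDICT (by name: the statement is the Claim_ definition above) =====
theorem exactlyK_spec : Claim_equal_exactlyK := by
  intro arr k _ _
  unfold Spec_exactlyK exactlyK exactlyK_alt pvAtmost
  have h := pvFused_foldl_comb arr k (List.range arr.length)
      (some (0, 0, PySem.Dict.empty)) (some (0, 0, PySem.Dict.empty))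
  rw [show (some (0, PySem.Dict.empty, 0, PySem.Dict.empty, 0) :
        Option (Int × PySem.Dict Int Int × Int × PySem.Dict Int Int × Int))
      = pvComb (some (0, 0, PySem.Dict.empty)) (some (0, 0, PySem.Dict.empty)) from rfl, h]
  cases (List.range arr.length).foldl (pvAtmostStep arr k) (some (0, 0, PySem.Dict.empty)) with
  | none => rfl
  | some s1 =>
    cases (List.range arr.length).foldl (pvAtmostStep arr (k - 1)) (some (0, 0, PySem.Dict.empty)) with
    | none => rfl
    | some s2 =>
      obtain ⟨l1, c1, m1⟩ := s1
      obtain ⟨l2, c2, m2⟩ := s2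
      rfl
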